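-- pv_equiv track=rewrite | github.com/PSU-Research-Computing/dbtracker | dbtracker/dbproviders.py | db_rowcount
-- ===== SOURCE A (Python) =====
-- def db_rowcount(tables):
--     dbs = {}
--     for table in tables:
--         if table["row_count"]:
--             if table["db_name"] in dbs:
--                 dbs[table["db_name"]] += table["db_name"]
--             else:
--                 dbs[table["db_name"]] = table["db_name"]
--     return dbs
-- ===== SOURCE B (Python) =====
-- def db_rowcount(tables):
--     names = [t["db_name"] for t in tables if t["row_count"]]
--     dbs = {}
--     for name in names:
--         if name not in dbs:
--             dbs[name] = name * names.count(name)
--     return dbs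
-- ===== Notes on version B (the rewrite author's own statement) =====
-- stated objective: alternative
-- what changed: B works in stages: it first extracts the list of db_names with truthy row_count, then loops over that list and, at each first occurrence of a name, emits the finished value at once as name * names.count(name) via a scan of the list, instead of A's single incremental pass that grows each dict entry by repeated string concatenation.
import Mathlib
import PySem

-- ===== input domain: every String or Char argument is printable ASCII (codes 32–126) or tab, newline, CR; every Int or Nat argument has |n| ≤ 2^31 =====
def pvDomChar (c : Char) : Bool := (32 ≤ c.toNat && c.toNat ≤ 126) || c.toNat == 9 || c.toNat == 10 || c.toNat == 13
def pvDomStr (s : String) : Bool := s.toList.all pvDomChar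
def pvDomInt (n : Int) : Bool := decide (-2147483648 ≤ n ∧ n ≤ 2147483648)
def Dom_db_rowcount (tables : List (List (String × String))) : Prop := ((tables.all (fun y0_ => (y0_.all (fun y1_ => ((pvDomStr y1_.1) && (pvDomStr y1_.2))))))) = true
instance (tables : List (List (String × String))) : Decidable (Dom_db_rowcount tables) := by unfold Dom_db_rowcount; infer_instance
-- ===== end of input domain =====

-- B first extracts the filtered db_name list, then fills each key once with name * names.count(name) (a counting scan per first occurrence) instead of A's incremental concatenation; alternative staged decomposition, return value proved equal.


-- ===== PORT A =====
-- table["k"] on an association list: first-match lookup (Python dict lookup); `.getD ""` is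
-- unreachable under Pre_db_rowcount (the key is present there; Python raises KeyError otherwise).
def dbLoopA (dbs : PySem.Dict String String) (table : List (String × String)) : PySem.Dict String String :=
  let rc := ((PySem.Dict.mk table).get? "row_count").getD ""
  if rc ≠ "" then
    let name := ((PySem.Dict.mk table).get? "db_name").getD ""
    if dbs.contains name then
      dbs.insert name (dbs.getD name "" ++ name)
    else
      dbs.insert name name
  else dbs

def db_rowcount (tables : List (List (String × String))) : List (String × String) :=
  (tables.foldl dbLoopA PySem.Dict.empty).items

-- ===== PORT B =====
-- stage 1 of B: the list comprehension [t["db_name"] for t in tables if t["row_count"]]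
def dbNames (tables : List (List (String × String))) : List String :=
  (tables.filter (fun t => !(((PySem.Dict.mk t).get? "row_count").getD "" == ""))).map
    (fun t => ((PySem.Dict.mk t).get? "db_name").getD "")

-- Python's `s * n` (string repetition, exact for n ≥ 0):
def strMul (s : String) (n : Int) : String :=
  String.ofList (List.flatten (List.replicate n.toNat s.toList))

-- stage 2 of B: fill each first-seen name with name * names.count(name)
def db_rowcount_alt (tables : List (List (String × String))) : List (String × String) :=
  let names := dbNames tables
  (names.foldl (fun dbs name =>
      if dbs.contains name then dbs
      else dbs.insert name (strMul name (names.count name))) PySem.Dict.empty).items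

-- ===== PRECONDITION & SPEC =====
-- Pre_ excludes exactly the inputs where Python A raises KeyError: a table without a
-- "row_count" key, or a table with truthy row_count but no "db_name" key.
def Pre_db_rowcount (tables : List (List (String × String))) : Prop :=
  ∀ t ∈ tables, (PySem.Dict.mk t).contains "row_count" = true ∧
    (((PySem.Dict.mk t).get? "row_count").getD "" ≠ "" → (PySem.Dict.mk t).contains "db_name" = true)
instance (tables : List (List (String × String))) : Decidable (Pre_db_rowcount tables) := by unfold Pre_db_rowcount; infer_instance

def pvWitness_db_rowcount : (List (List (String × String))) :=
  [[("row_count", "3"), ("db_name", "a")], [("row_count", ""), ("db_name", "b")]]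

def Spec_db_rowcount (tables : List (List (String × String))) (out : List (String × String)) : Prop := out = db_rowcount_alt tables
instance (tables : List (List (String × String))) (out : List (String × String)) : Decidable (Spec_db_rowcount tables out) := by unfold Spec_db_rowcount; infer_instance

-- ===== CLAIM (what is proved, stated in full; the proofs are below) =====
def Claim_equal_db_rowcount : Prop := ∀ (tables : List (List (String × String))), Dom_db_rowcount tables → Pre_db_rowcount tables → Spec_db_rowcount tables (db_rowcount tables)

-- ===== LEMMAS AND PROOFS =====

def pvStepA (d : PySem.Dict String String) (x : String) : PySem.Dict String String :=
  if d.contains x then d.insert x (d.getD x "" ++ x) else d.insert x x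

lemma foldA_eq (tables : List (List (String × String))) (d : PySem.Dict String String) :
    tables.foldl dbLoopA d = (dbNames tables).foldl pvStepA d := by
  induction tables generalizing d with
  | nil => rfl
  | cons t ts ih =>
    rw [List.foldl_cons]
    by_cases h : ((PySem.Dict.mk t).get? "row_count").getD "" = ""
    · rw [show dbLoopA d t = d from by simp [dbLoopA, h]]
      rw [ih, show dbNames (t :: ts) = dbNames ts from by simp [dbNames, h]]
    · rw [show dbLoopA d t = pvStepA d (((PySem.Dict.mk t).get? "db_name").getD "") from by
        simp [dbLoopA, pvStepA, h]]
      rw [ih]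
      rw [show dbNames (t :: ts) = ((PySem.Dict.mk t).get? "db_name").getD "" :: dbNames ts from by
        simp [dbNames, h]]
      rw [List.foldl_cons]

lemma strMul_succ (s : String) (n : Int) (hn : 0 ≤ n) :
    strMul s (n + 1) = strMul s n ++ s := by
  have h : (n + 1).toNat = n.toNat + 1 := by omega
  simp [strMul, h, List.replicate_succ']

lemma strMul_one (s : String) : strMul s 1 = s := by
  simp [strMul]

-- A's fold over the name sequence, characterised in closed form
lemma foldA_items (ns : List String) :
    ((ns.foldl pvStepA PySem.Dict.empty).items) =
      (PySem.Set.ofList ns).map (fun k => (k, strMul k (ns.count k))) := by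
  induction ns using List.reverseRecOn with
  | nil => rfl
  | append_singleton ns x ih =>
    rw [List.foldl_append, List.foldl_cons, List.foldl_nil]
    have hkeys : (ns.foldl pvStepA PySem.Dict.empty).keys = PySem.Set.ofList ns := by
      simp only [PySem.Dict.keys, ih, List.map_map]
      rw [show (Prod.fst ∘ fun k : String => (k, strMul k (ns.count k))) = id from rfl, List.map_id]
    have hnd : (ns.foldl pvStepA PySem.Dict.empty).keys.Nodup := by
      rw [hkeys]; exact PySem.Set.nodup_ofList ns
    by_cases hx : x ∈ ns
    · have hxs : x ∈ PySem.Set.ofList ns := by simp [PySem.Set.mem_ofList, hx]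
      have hc : (ns.foldl pvStepA PySem.Dict.empty).contains x = true := by
        rw [PySem.Dict.contains_iff_mem_keys, hkeys]; exact hxs
      have hget : (ns.foldl pvStepA PySem.Dict.empty).getD x "" = strMul x (ns.count x) := by
        exact PySem.Dict.getD_of_mem_items _ (by rw [ih]; exact List.mem_map_of_mem hxs) hnd ""
      have hofl : PySem.Set.ofList (ns ++ [x]) = PySem.Set.ofList ns := by
        rw [PySem.Set.ofList_eq_foldl, List.foldl_append, ← PySem.Set.ofList_eq_foldl]
        simp [PySem.Set.add, hxs]
      rw [pvStepA, if_pos hc, PySem.Dict.items_insert_of_contains _ _ hc, ih, hofl, List.map_map]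
      apply List.map_congr_left
      intro k hk
      simp only [Function.comp_apply]
      by_cases hkx : k = x
      · subst hkx
        have hcnt : (0 : Int) ≤ (ns.count k : Int) := Int.natCast_nonneg _
        simp [hget, strMul_succ _ _ hcnt]
      · have hxk : ¬x = k := fun h => hkx h.symm
        have hcc : (ns ++ [x]).count k = ns.count k := by
          rw [List.count_append]; simp [hxk]
        simp [hkx, hcc]
    · have hxs : x ∉ PySem.Set.ofList ns := by simp [PySem.Set.mem_ofList, hx]
      have hc : (ns.foldl pvStepA PySem.Dict.empty).contains x = false := by
        rw [Bool.eq_false_iff]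
        intro hcc
        exact hxs (by rw [← hkeys]; exact (PySem.Dict.contains_iff_mem_keys _ _).mp hcc)
      have hofl : PySem.Set.ofList (ns ++ [x]) = PySem.Set.ofList ns ++ [x] := by
        rw [PySem.Set.ofList_eq_foldl, List.foldl_append, ← PySem.Set.ofList_eq_foldl]
        have : (PySem.Set.ofList ns).contains x = false := by
          rw [Bool.eq_false_iff]
          intro hcc
          exact hxs ((PySem.Set.contains_iff _ _).mp hcc)
        simp [PySem.Set.add, hx]
      rw [pvStepA, if_neg (by simp [hc]), PySem.Dict.items_insert_of_not_contains _ _ hc, ih, hofl]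
      rw [List.map_append]
      congr 1
      · apply List.map_congr_left
        intro k hk
        have hkx : k ≠ x := by
          intro h; exact hxs (h ▸ hk)
        have hxk : ¬x = k := fun h => hkx h.symm
        rw [List.count_append]
        simp [hxk]
      · have h0 : ns.count x = 0 := List.count_eq_zero.mpr hx
        simp [List.count_append, List.count_cons, h0, strMul_one]

-- B's insert-if-absent fold with a fixed value function, characterised in closed form
lemma foldB_items (f : String → String) (ns : List String) :
    ((ns.foldl (fun d x => if d.contains x then d else d.insert x (f x)) PySem.Dict.empty).items) =
      (PySem.Set.ofList ns).map (fun k => (k, f k)) := by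
  induction ns using List.reverseRecOn with
  | nil => rfl
  | append_singleton ns x ih =>
    rw [List.foldl_append, List.foldl_cons, List.foldl_nil]
    have hkeys : ((ns.foldl (fun d x => if d.contains x then d else d.insert x (f x)) PySem.Dict.empty)).keys = PySem.Set.ofList ns := by
      simp only [PySem.Dict.keys, ih, List.map_map]
      rw [show (Prod.fst ∘ fun k : String => (k, f k)) = id from rfl, List.map_id]
    by_cases hx : x ∈ ns
    · have hxs : x ∈ PySem.Set.ofList ns := by simp [PySem.Set.mem_ofList, hx]
      have hc : ((ns.foldl (fun d x => if d.contains x then d else d.insert x (f x)) PySem.Dict.empty)).contains x = true := by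
        rw [PySem.Dict.contains_iff_mem_keys, hkeys]; exact hxs
      have hofl : PySem.Set.ofList (ns ++ [x]) = PySem.Set.ofList ns := by
        rw [PySem.Set.ofList_eq_foldl, List.foldl_append, ← PySem.Set.ofList_eq_foldl]
        simp [PySem.Set.add, hxs]
      rw [if_pos hc, ih, hofl]
    · have hxs : x ∉ PySem.Set.ofList ns := by simp [PySem.Set.mem_ofList, hx]
      have hc : ((ns.foldl (fun d x => if d.contains x then d else d.insert x (f x)) PySem.Dict.empty)).contains x = false := by
        rw [Bool.eq_false_iff]
        intro hcc
        exact hxs (by rw [← hkeys]; exact (PySem.Dict.contains_iff_mem_keys _ _).mp hcc)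
      have hofl : PySem.Set.ofList (ns ++ [x]) = PySem.Set.ofList ns ++ [x] := by
        rw [PySem.Set.ofList_eq_foldl, List.foldl_append, ← PySem.Set.ofList_eq_foldl]
        have : (PySem.Set.ofList ns).contains x = false := by
          rw [Bool.eq_false_iff]
          intro hcc
          exact hxs ((PySem.Set.contains_iff _ _).mp hcc)
        simp [PySem.Set.add, hx]
      rw [if_neg (by simp [hc]), PySem.Dict.items_insert_of_not_contains _ _ hc, ih, hofl,
        List.map_append]
      rfl

theorem db_rowcount_spec : Claim_equal_db_rowcount := by
  intro tables _ _
  unfold Spec_db_rowcount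
  show db_rowcount tables = db_rowcount_alt tables
  rw [db_rowcount, db_rowcount_alt, foldA_eq, foldA_items]
  rw [foldB_items (fun k => strMul k ((dbNames tables).count k)) (dbNames tables)]
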